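-- pv_equiv track=rewrite | github.com/oliverbarreto/FortniteVS | fortniteversus/routes.py | stringIsEmpty
-- ===== SOURCE A (Python) =====
-- def stringIsEmpty(string):
--   result = 0
--   for char in string:
--     if char == " ":
--       result += 1     # same as result = result + 1
--   if result == len(string):
--     return True
--   else:
--     return False
-- ===== SOURCE B (Python) =====
-- def stringIsEmpty(string):
--   return set(string) <= {" "}
-- ===== Notes on version B (the rewrite author's own statement) =====
-- stated objective: simpler
-- what changed: Replaces the running space-counter and the count==len comparison with a single distinct-character-set subset test against the singleton space set.
import Mathlib
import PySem

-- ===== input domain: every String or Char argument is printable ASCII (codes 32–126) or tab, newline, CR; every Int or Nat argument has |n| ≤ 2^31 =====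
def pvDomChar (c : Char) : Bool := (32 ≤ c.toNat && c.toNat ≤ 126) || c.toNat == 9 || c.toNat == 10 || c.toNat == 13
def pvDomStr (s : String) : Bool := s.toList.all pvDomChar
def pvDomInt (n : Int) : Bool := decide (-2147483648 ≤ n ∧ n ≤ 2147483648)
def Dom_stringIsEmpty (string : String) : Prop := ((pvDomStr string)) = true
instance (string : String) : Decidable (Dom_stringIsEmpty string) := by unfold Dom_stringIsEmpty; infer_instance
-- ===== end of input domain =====

-- B replaces A's running space-counter and count==len comparison with a distinct-character-set subset test (simpler).

-- ===== PORT A =====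
def stringIsEmpty (string : String) : Bool :=
  let result : Int := string.toList.foldl (fun result char => if char = ' ' then result + 1 else result) 0
  if result = (PySem.Str.len string : Int) then true else false

-- ===== PORT B =====
def stringIsEmpty_alt (string : String) : Bool :=
  PySem.Set.issubset (PySem.Set.ofList string.toList) [' ']

-- ===== PRECONDITION & SPEC =====
def Spec_stringIsEmpty (string : String) (out : Bool) : Prop := out = stringIsEmpty_alt string
instance (string : String) (out : Bool) : Decidable (Spec_stringIsEmpty string out) := by unfold Spec_stringIsEmpty; infer_instance

-- ===== CLAIM (what is proved, stated in full; the proofs are below) =====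
def Claim_equal_stringIsEmpty : Prop := ∀ (string : String), Dom_stringIsEmpty string → Spec_stringIsEmpty string (stringIsEmpty string)

-- ===== LEMMAS AND PROOFS =====

theorem pv_foldl_count (l : List Char) (a : Int) :
    l.foldl (fun result char => if char = ' ' then result + 1 else result) a
      = a + (l.count ' ' : Int) := by
  induction l generalizing a with
  | nil => simp
  | cons c t ih =>
    simp only [List.foldl_cons, ih, List.count_cons]
    by_cases h : c = ' ' <;> simp [h, beq_iff_eq] <;> ring

theorem pv_count_eq_len_iff (l : List Char) :
    (l.count ' ' = l.length) ↔ ∀ c ∈ l, c = ' ' := by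
  rw [List.count_eq_length]
  exact ⟨fun h c hc => (h c hc).symm, fun h c hc => (h c hc).symm⟩

theorem pv_alt_iff (l : List Char) :
    PySem.Set.issubset (PySem.Set.ofList l) [' '] = true ↔ ∀ c ∈ l, c = ' ' := by
  simp [PySem.Set.issubset, PySem.Set.contains, PySem.Set.mem_ofList]

-- ===== VERDICT (by name: the statement is the Claim_ definition above) =====
theorem stringIsEmpty_spec : Claim_equal_stringIsEmpty := by
  intro s _
  unfold Spec_stringIsEmpty stringIsEmpty stringIsEmpty_alt
  simp only [pv_foldl_count, PySem.Str.len_eq]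
  by_cases h : ∀ c ∈ s.toList, c = ' '
  · have h1 : s.toList.count ' ' = s.toList.length := (pv_count_eq_len_iff _).2 h
    have h2 := (pv_alt_iff s.toList).2 h
    simp [h1, h2]
  · have h1 : s.toList.count ' ' ≠ s.toList.length := fun hc => h ((pv_count_eq_len_iff _).1 hc)
    have h2 : PySem.Set.issubset (PySem.Set.ofList s.toList) [' '] ≠ true :=
      fun hc => h ((pv_alt_iff _).1 hc)
    simp only [Bool.not_eq_true] at h2
    have h3 : s.toList.length = s.length := by simp
    simp [h2]
    omega
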